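-- pv_equiv track=rewrite | github.com/drdileepunni/llm_wiki | app/backend/services/quality_scorer.py | update_scope_frontmatter
-- ===== SOURCE A (Python) =====
-- def _get_fm_bounds(content: str):
--     """Return (fm_start_lines, fm_end_idx, body_lines) or None if no frontmatter."""
--     lines = content.splitlines()
--     if not lines or lines[0].strip() != "---":
--         return None
--     for i in range(1, len(lines)):
--         if lines[i].strip() == "---":
--             return lines, i
--     return None
--
-- def update_scope_frontmatter(content: str, scope: str) -> str:
--     """Inject or replace the scope: field in YAML frontmatter."""
--     result = _get_fm_bounds(content)
--     if result is None:
--         return content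
--     lines, fm_end = result
--     cleaned = [l for l in lines[1:fm_end] if not l.startswith("scope:")]
--     return "\n".join(
--         ["---"] + cleaned + [f'scope: "{scope}"'] + ["---"] + lines[fm_end + 1:]
--     )
-- ===== SOURCE B (Python) =====
-- def update_scope_frontmatter(content: str, scope: str) -> str:
--     """Inject or replace the scope: field in YAML frontmatter.
--
--     Single state-machine pass: no helper, no index search, no slicing;
--     every line after the opening fence is routed by the current state."""
--     lines = content.splitlines()
--     if not lines or lines[0].strip() != "---":
--         return content
--     closed = False
--     out = ["---"]
--     for line in lines[1:]:
--         if closed: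
--             out.append(line)
--         elif line.strip() == "---":
--             closed = True
--             out.append(f'scope: "{scope}"')
--             out.append("---")
--         elif not line.startswith("scope:"):
--             out.append(line)
--     return "\n".join(out) if closed else content
-- ===== Notes on version B (the rewrite author's own statement) =====
-- stated objective: alternative
-- what changed: Replaced A's staged pipeline (helper index-scan for the closing fence, then slice-and-filter the frontmatter, then splice the tail slice) by one uniform state-machine pass in which every line after the opening fence is routed by a closed/open state, with no helper, no index arithmetic and no slicing.
import Mathlib
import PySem

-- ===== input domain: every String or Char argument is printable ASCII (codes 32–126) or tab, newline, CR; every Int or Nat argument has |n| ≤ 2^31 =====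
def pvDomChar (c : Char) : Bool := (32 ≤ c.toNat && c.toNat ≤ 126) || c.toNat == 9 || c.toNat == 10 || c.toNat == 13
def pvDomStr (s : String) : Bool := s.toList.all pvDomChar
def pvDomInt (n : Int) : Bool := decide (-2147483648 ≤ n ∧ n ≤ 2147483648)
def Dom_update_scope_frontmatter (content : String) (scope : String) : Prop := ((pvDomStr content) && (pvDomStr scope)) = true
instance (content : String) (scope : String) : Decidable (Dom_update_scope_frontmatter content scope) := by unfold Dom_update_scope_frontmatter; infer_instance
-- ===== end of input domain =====

-- B replaces A's staged pipeline (helper index-scan for the closing fence, then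
-- slice-and-filter, then splice the tail) by one uniform state-machine pass over
-- the lines: no helper, no index arithmetic, no slicing. Objective: alternative.

-- ===== PORT A =====
-- A's helper loop: for i in range(1, len(lines)): if lines[i].strip() == "---": return lines, i
def pvFmFind (lines : List String) (i : Nat) : Option Nat :=
  if h : i < lines.length then
    if PySem.Str.strip lines[i] = "---" then some i
    else pvFmFind lines (i + 1)
  else none
termination_by lines.length - i

def pvGetFmBounds (content : String) : Option (List String × Nat) :=
  let lines := PySem.Str.splitlines content
  match lines with
  | [] => none
  | l0 :: _ =>
    if PySem.Str.strip l0 ≠ "---" then none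
    else
      match pvFmFind lines 1 with
      | some i => some (lines, i)
      | none => none

def update_scope_frontmatter (content : String) (scope : String) : String :=
  match pvGetFmBounds content with
  | none => content
  | some (lines, fmEnd) =>
    let cleaned := (PySem.List.slice lines (some 1) (some (fmEnd : Int))).filter
      (fun l => !PySem.Str.startswith l "scope:")
    PySem.Str.join "\n"
      (["---"] ++ cleaned ++ ["scope: \"" ++ scope ++ "\""] ++ ["---"]
        ++ PySem.List.slice lines (some ((fmEnd : Int) + 1)) none)

-- ===== PORT B =====
-- B's state machine: state = (closed fence seen yet, output lines so far).
def pvStep (scope : String) (st : Bool × List String) (line : String) : Bool × List String :=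
  if st.1 then (true, st.2 ++ [line])
  else if PySem.Str.strip line = "---" then
    (true, st.2 ++ ["scope: \"" ++ scope ++ "\"", "---"])
  else if PySem.Str.startswith line "scope:" then st
  else (st.1, st.2 ++ [line])

def update_scope_frontmatter_alt (content : String) (scope : String) : String :=
  match PySem.Str.splitlines content with
  | [] => content
  | first :: rest =>
    if PySem.Str.strip first ≠ "---" then content
    else
      let st := rest.foldl (pvStep scope) (false, ["---"])
      if st.1 then PySem.Str.join "\n" st.2 else content

-- ===== PRECONDITION & SPEC =====
def Spec_update_scope_frontmatter (content : String) (scope : String) (out : String) : Prop := out = update_scope_frontmatter_alt content scope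
instance (content : String) (scope : String) (out : String) : Decidable (Spec_update_scope_frontmatter content scope out) := by unfold Spec_update_scope_frontmatter; infer_instance

-- ===== CLAIM (what is proved, stated in full; the proofs are below) =====
def Claim_equal_update_scope_frontmatter : Prop := ∀ (content : String) (scope : String), Dom_update_scope_frontmatter content scope → Spec_update_scope_frontmatter content scope (update_scope_frontmatter content scope)

-- ===== LEMMAS AND PROOFS =====

-- After the closing fence, the state machine just copies lines.
theorem pvStep_foldl_true (scope : String) (rest out : List String) :
    rest.foldl (pvStep scope) (true, out) = (true, out ++ rest) := by
  induction rest generalizing out with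
  | nil => simp
  | cons l rest ih => simp [List.foldl_cons, pvStep, ih]

-- B's fold in closed form: first closing fence k, filtered prefix, scope line, tail.
theorem pvStep_foldl_false (scope : String) (rest out : List String) :
    rest.foldl (pvStep scope) (false, out) =
      match rest.findIdx? (fun l => PySem.Str.strip l == "---") with
      | none => (false, out ++ rest.filter (fun l => !PySem.Str.startswith l "scope:"))
      | some k => (true, out ++ (rest.take k).filter (fun l => !PySem.Str.startswith l "scope:")
          ++ ["scope: \"" ++ scope ++ "\"", "---"] ++ rest.drop (k + 1)) := by
  induction rest generalizing out with
  | nil => simp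
  | cons l rest ih =>
    by_cases h : PySem.Str.strip l = "---"
    · simp [List.foldl_cons, pvStep, h, List.findIdx?_cons, pvStep_foldl_true]
    · by_cases hs : PySem.Str.startswith l "scope:"
      · rw [List.foldl_cons, show pvStep scope (false, out) l = (false, out) by
            simp [pvStep, h]; simpa using hs, ih, List.findIdx?_cons]
        cases hf : rest.findIdx? (fun l => PySem.Str.strip l == "---") <;>
          · simp only [hf, beq_iff_eq, h, if_false, Option.map_none, Option.map_some,
              List.filter_cons, hs, Bool.not_true, List.take_succ_cons, List.drop_succ_cons]
            simp
      · rw [List.foldl_cons, show pvStep scope (false, out) l = (false, out ++ [l]) by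
            simp [pvStep, h]; simpa using hs, ih, List.findIdx?_cons]
        cases hf : rest.findIdx? (fun l => PySem.Str.strip l == "---") <;>
          · simp only [hf, beq_iff_eq, h, if_false, Option.map_none, Option.map_some,
              List.filter_cons, hs, Bool.not_false, List.take_succ_cons, List.drop_succ_cons]
            simp

-- A's index loop in closed form.
theorem pvFmFind_spec (lines : List String) (i : Nat) :
    pvFmFind lines i =
      ((lines.drop i).findIdx? (fun l => PySem.Str.strip l == "---")).map (fun k => i + k) := by
  by_cases h : i < lines.length
  · rw [pvFmFind, dif_pos h]
    have hdrop : lines.drop i = lines[i] :: lines.drop (i + 1) :=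
      List.drop_eq_getElem_cons h
    rw [hdrop, List.findIdx?_cons]
    by_cases hs : PySem.Str.strip lines[i] = "---"
    · simp [hs]
    · simp only [beq_iff_eq, hs, if_false, Option.map_map]
      rw [pvFmFind_spec lines (i + 1)]
      cases (lines.drop (i + 1)).findIdx? (fun l => PySem.Str.strip l == "---") with
      | none => rfl
      | some k => simp [Function.comp]; omega
  · rw [pvFmFind, dif_neg h]
    rw [List.drop_eq_nil_of_le (by omega)]
    simp
termination_by lines.length - i

-- ===== VERDICT (by name: the statement is the Claim_ definition above) =====
theorem update_scope_frontmatter_spec : Claim_equal_update_scope_frontmatter := by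
  intro content scope _
  show update_scope_frontmatter content scope = update_scope_frontmatter_alt content scope
  unfold update_scope_frontmatter update_scope_frontmatter_alt pvGetFmBounds
  cases hsp : PySem.Str.splitlines content with
  | nil => simp
  | cons first rest =>
    by_cases h0 : PySem.Str.strip first = "---"
    · have hne : ¬(PySem.Str.strip first ≠ "---") := by simp [h0]
      simp only [if_neg hne]
      rw [pvFmFind_spec, pvStep_foldl_false]
      have hdrop : (first :: rest).drop 1 = rest := rfl
      rw [hdrop]
      cases hf : rest.findIdx? (fun l => PySem.Str.strip l == "---") with
      | none => simp
      | some k =>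
        simp only [Option.map_some]
        have hk : k < rest.length := (List.findIdx?_eq_some_iff_findIdx_eq.1 hf).1
        have h1 : PySem.List.slice (first :: rest) (some 1) (some ((1 + k : Nat) : Int)) =
            rest.take k := by
          rw [show ((1 : Int)) = ((1 : Nat) : Int) by norm_num,
            PySem.List.slice_natCast]
          simp
        have h2 : PySem.List.slice (first :: rest) (some (((1 + k : Nat) : Int) + 1)) none =
            rest.drop (k + 1) := by
          rw [show (((1 + k : Nat) : Int) + 1) = ((k + 2 : Nat) : Int) by push_cast; ring,
            PySem.List.slice_from_natCast]
          simp [show k + 2 = (k + 1) + 1 from rfl, List.drop_succ_cons]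
        rw [h1, h2]
        simp
    · simp [h0]
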